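-- pv_equiv track=rewrite | github.com/Jordan231111/CodeForce-Solutions | randomCodeChefAndCodeForce/test_Split_Subarray_Sort.py | f_brutal
-- ===== SOURCE A (Python) =====
-- def f_brutal(arr, K):
--     n = len(arr)
--     if n == 0:
--         return []
--     best = None
--     upto = min(K, n)
--     for e in range(1, upto + 1):
--         left = sorted(arr[:e])
--         right = f_brutal(arr[e:], K)
--         cand = left + right
--         if best is None or cand < best:
--             best = cand
--     return best
-- ===== SOURCE B (Python) =====
-- def f_brutal(arr, K):
--     # Bottom-up DP over suffixes: suffix_best[j] is the answer for the last j
--     # elements of arr, so each subproblem is solved once instead of exponentially.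
--     n = len(arr)
--     suffix_best = [[]]
--     for i in range(n - 1, -1, -1):
--         limit = min(K, n - i)
--         best = min((sorted(arr[i:i + e]) + suffix_best[n - i - e]
--                     for e in range(1, limit + 1)), default=None)
--         suffix_best.append(best)
--     return suffix_best[n]
-- ===== Notes on version B (the rewrite author's own statement) =====
-- stated objective: faster
-- what changed: Replaced A's exponential top-down recursion (re-solving each suffix many times) by a bottom-up dynamic program that computes the answer for every suffix exactly once.
-- outside the precondition, e.g. on f_brutal([1], 0): A returns None, B returns None
import Mathlib
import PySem

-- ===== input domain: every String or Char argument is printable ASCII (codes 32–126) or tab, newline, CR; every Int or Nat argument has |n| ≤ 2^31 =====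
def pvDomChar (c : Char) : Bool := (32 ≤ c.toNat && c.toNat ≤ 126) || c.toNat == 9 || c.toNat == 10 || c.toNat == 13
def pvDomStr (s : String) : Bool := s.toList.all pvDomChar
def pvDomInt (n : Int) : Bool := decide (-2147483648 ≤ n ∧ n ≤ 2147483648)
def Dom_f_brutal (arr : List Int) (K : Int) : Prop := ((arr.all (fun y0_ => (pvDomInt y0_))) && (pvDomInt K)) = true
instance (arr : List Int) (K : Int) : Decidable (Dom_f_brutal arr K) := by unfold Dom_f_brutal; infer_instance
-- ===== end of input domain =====

-- B replaces A's exponential recursion by a bottom-up DP over suffixes (each suffix solved once).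

-- ===== PORT A =====
-- A is recursive; ported with a fuel counter set to arr.length, which always suffices
-- because every recursive call drops at least one element. When the loop body never runs
-- (arr nonempty and K < 1) Python returns None, not a list; the port returns [] there and
-- Pre_f_brutal excludes exactly those inputs.
def brutalFuel : Nat → List Int → Int → List Int
  | 0, _, _ => []
  | fuel+1, arr, K =>
      if arr.length = 0 then [] else
        let upto : Int := min K (arr.length : Int)
        let best := (PySem.List.pyRange 1 (upto + 1)).foldl (fun best e =>
            let left := PySem.List.sorted (PySem.List.slice arr none (some e)) (fun x => x)
            let right := brutalFuel fuel (PySem.List.slice arr (some e) none) K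
            let cand := left ++ right
            match best with
            | none => some cand
            | some b => if cand < b then some cand else some b) none
        best.getD []

def f_brutal (arr : List Int) (K : Int) : List Int := brutalFuel arr.length arr K

-- ===== PORT B =====
-- Bottom-up DP: suffix_best[j] is the answer for the last j elements of arr.
-- Python's min(..., default=None) yields None on an empty candidate list (arr nonempty,
-- K < 1, as in A); the port yields [] there and Pre_f_brutal excludes exactly those inputs,
-- so the table never actually holds a None inside Pre_.
def f_brutal_alt (arr : List Int) (K : Int) : List Int :=
  let n := arr.length
  let suffix_best := (PySem.List.pyRange ((n : Int) - 1) (-1) (-1)).foldl (fun sb i =>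
      let limit : Int := min K ((n : Int) - i)
      let cands := (PySem.List.pyRange 1 (limit + 1)).map (fun e =>
          PySem.List.sorted (PySem.List.slice arr (some i) (some (i + e))) (fun x => x)
            ++ PySem.List.pyGetD sb ((n : Int) - i - e) [])
      sb ++ [(PySem.List.min? cands (fun x => x)).getD []]) [[]]
  PySem.List.pyGetD suffix_best (n : Int) []

-- ===== PRECONDITION & SPEC =====
-- Pre_ excludes nonempty arr with K < 1: there both Python A and Python B return None,
-- which is not a value of the declared list type.
def Pre_f_brutal (arr : List Int) (K : Int) : Prop := arr = [] ∨ 1 ≤ K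
instance (arr : List Int) (K : Int) : Decidable (Pre_f_brutal arr K) := by
  unfold Pre_f_brutal; infer_instance
def pvWitness_f_brutal : List Int × Int := ([2, 1, 3], 2)

def Spec_f_brutal (arr : List Int) (K : Int) (out : List Int) : Prop := out = f_brutal_alt arr K
instance (arr : List Int) (K : Int) (out : List Int) : Decidable (Spec_f_brutal arr K out) := by
  unfold Spec_f_brutal; infer_instance

-- ===== CLAIM (what is proved, stated in full; the proofs are below) =====
def Claim_equal_f_brutal : Prop := ∀ (arr : List Int) (K : Int), Dom_f_brutal arr K → Pre_f_brutal arr K → Spec_f_brutal arr K (f_brutal arr K)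

-- ===== LEMMAS AND PROOFS =====

-- the answer for the suffix made of the last j elements
def suffAns (arr : List Int) (K : Int) (j : Nat) : List Int :=
  f_brutal (arr.drop (arr.length - j)) K

lemma brutalFuel_nil (fuel : Nat) (K : Int) : brutalFuel fuel [] K = [] := by
  cases fuel <;> simp [brutalFuel]

lemma brutalFuel_eq_of_le : ∀ (fuel : Nat) (arr : List Int) (K : Int),
    arr.length ≤ fuel → brutalFuel fuel arr K = brutalFuel arr.length arr K := by
  intro fuel
  induction fuel using Nat.strong_induction_on with
  | _ fuel ih =>
    intro arr K hle
    match arr, fuel with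
    | [], fuel => simp [brutalFuel_nil]
    | x :: xs, fuel + 1 =>
      simp only [brutalFuel, List.length_cons]
      refine congrArg (fun o => Option.getD o []) ?_
      apply PySem.List.foldl_congr_mem
      intro acc e he
      have h1 : 1 ≤ e ∧ e < min K ((x :: xs).length : Int) + 1 :=
        PySem.List.mem_pyRange_one.mp he
      have h0 : (0 : Int) ≤ e := by omega
      have hdlen : (PySem.List.slice (x :: xs) (some e) none).length ≤ xs.length := by
        rw [PySem.List.slice_from _ h0]
        simp only [List.length_drop, List.length_cons]
        omega
      have hfl : xs.length < fuel + 1 := by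
        simp only [List.length_cons] at hle; omega
      rw [ih fuel (by omega) _ K (by omega),
          ih xs.length hfl _ K (by omega)]

-- characterisation of A on a nonempty list: the first minimal candidate
lemma f_brutal_unfold (arr : List Int) (K : Int) (h : arr ≠ []) :
    f_brutal arr K =
      (PySem.List.min? ((PySem.List.pyRange 1 (min K (arr.length : Int) + 1)).map
          (fun e => PySem.List.sorted (arr.take e.toNat) (fun x => x)
                      ++ f_brutal (arr.drop e.toNat) K)) (fun x => x)).getD [] := by
  match arr with
  | x :: xs =>
    simp only [f_brutal, List.length_cons, brutalFuel, PySem.List.min?, List.foldl_map]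
    refine congrArg (fun o => Option.getD o []) ?_
    apply PySem.List.foldl_congr_mem
    intro acc e he
    have h1 : 1 ≤ e ∧ e < min K ((xs.length : Int) + 1) + 1 :=
      PySem.List.mem_pyRange_one.mp he
    have h0 : (0 : Int) ≤ e := by omega
    rw [PySem.List.slice_to _ h0, PySem.List.slice_from _ h0]
    have hdl : ((x :: xs).drop e.toNat).length ≤ xs.length := by
      simp only [List.length_drop, List.length_cons]; omega
    rw [brutalFuel_eq_of_le xs.length _ K hdl]
    cases acc <;> rfl

lemma pyRange_neg_one_snoc (a b : Int) (h : b ≤ a) :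
    PySem.List.pyRange a (b - 1) (-1) = PySem.List.pyRange a b (-1) ++ [b] := by
  rw [PySem.List.pyRange_neg_one_eq_reverse, PySem.List.pyRange_neg_one_eq_reverse,
      PySem.List.pyRange_one_cons (by omega : b - 1 + 1 < a + 1)]
  simp

lemma step_value (arr : List Int) (K : Int) (s : Nat) (hs : s + 1 ≤ arr.length) :
    (PySem.List.min? ((PySem.List.pyRange 1
        (min K ((arr.length : Int) - ((arr.length : Int) - 1 - s)) + 1)).map (fun e =>
      PySem.List.sorted (PySem.List.slice arr (some ((arr.length : Int) - 1 - s))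
          (some (((arr.length : Int) - 1 - s) + e))) (fun x => x)
        ++ PySem.List.pyGetD ((List.range (s + 1)).map (suffAns arr K))
            ((arr.length : Int) - ((arr.length : Int) - 1 - s) - e) [])) (fun x => x)).getD []
    = suffAns arr K (s + 1) := by
  have hN : (s : Int) + 1 ≤ (arr.length : Int) := by exact_mod_cast hs
  have hlt : (arr.drop (arr.length - (s + 1))).length = s + 1 := by
    simp only [List.length_drop]; omega
  have ht : arr.drop (arr.length - (s + 1)) ≠ [] := by
    apply List.ne_nil_of_length_pos; omega
  simp only [suffAns]
  rw [f_brutal_unfold _ K ht]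
  have hb : (arr.length : Int) - ((arr.length : Int) - 1 - s)
      = ((arr.drop (arr.length - (s + 1))).length : Int) := by
    rw [hlt]; push_cast; ring
  rw [hb, hlt]
  refine congrArg (fun o => Option.getD o []) ?_
  refine congrArg (fun l => PySem.List.min? l (fun x => x)) ?_
  apply List.map_congr_left
  intro e he
  have h1 : 1 ≤ e ∧ e < min K ((s + 1 : Nat) : Int) + 1 := PySem.List.mem_pyRange_one.mp he
  have he1 : 1 ≤ e := h1.1
  have he2 : e ≤ (s : Int) + 1 := by
    have hmin : min K (((s + 1 : Nat) : Int)) ≤ ((s + 1 : Nat) : Int) := min_le_right _ _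
    have := h1.2
    push_cast at hmin this ⊢
    omega
  have hi : (0 : Int) ≤ (arr.length : Int) - 1 - s := by omega
  have hie : (0 : Int) ≤ ((arr.length : Int) - 1 - s) + e := by omega
  rw [PySem.List.slice_toNat arr hi hie]
  have hiN : ((arr.length : Int) - 1 - s).toNat = arr.length - (s + 1) := by omega
  rw [hiN]
  have hdiff : (((arr.length : Int) - 1 - s) + e).toNat - (arr.length - (s + 1)) = e.toNat := by
    omega
  rw [hdiff]
  have hv : (0 : Int) ≤ ((s + 1 : Nat) : Int) - e := by push_cast; omega
  rw [PySem.List.pyGetD_of_nonneg _ _ hv]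
  have hj : (((s + 1 : Nat) : Int) - e).toNat = s + 1 - e.toNat := by push_cast; omega
  rw [hj]
  have hjlt : s + 1 - e.toNat < ((List.range (s + 1)).map (suffAns arr K)).length := by
    simp only [List.length_map, List.length_range]; omega
  rw [List.getD_eq_getElem _ _ hjlt]
  simp only [List.getElem_map, List.getElem_range]
  congr 1
  simp only [suffAns, List.drop_drop]
  have : arr.length - (s + 1 - e.toNat) = arr.length - (s + 1) + e.toNat := by omega
  rw [this]

lemma dp_invariant (arr : List Int) (K : Int) : ∀ (s : Nat), s ≤ arr.length →
    (PySem.List.pyRange ((arr.length : Int) - 1) ((arr.length : Int) - 1 - s) (-1)).foldl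
      (fun sb i =>
        let limit : Int := min K ((arr.length : Int) - i)
        let cands := (PySem.List.pyRange 1 (limit + 1)).map (fun e =>
            PySem.List.sorted (PySem.List.slice arr (some i) (some (i + e))) (fun x => x)
              ++ PySem.List.pyGetD sb ((arr.length : Int) - i - e) [])
        sb ++ [(PySem.List.min? cands (fun x => x)).getD []]) [[]]
    = (List.range (s + 1)).map (suffAns arr K) := by
  intro s
  induction s with
  | zero =>
    intro _
    rw [show ((arr.length : Int) - 1 - ((0 : Nat) : Int)) = (arr.length : Int) - 1 by
      push_cast; ring]
    rw [PySem.List.pyRange_neg_one_eq_nil (le_refl _)]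
    simp [suffAns, f_brutal, brutalFuel_nil]
  | succ s ih =>
    intro hs
    have hsN : s ≤ arr.length := by omega
    rw [show ((arr.length : Int) - 1 - ((s + 1 : Nat) : Int)) = ((arr.length : Int) - 1 - s) - 1
        by push_cast; ring]
    rw [pyRange_neg_one_snoc _ _ (by omega), List.foldl_append, ih hsN]
    simp only [List.foldl_cons, List.foldl_nil]
    rw [List.range_succ (n := s + 1), List.map_append]
    congr 1
    simp only [List.map_cons, List.map_nil]
    congr 1
    exact step_value arr K s hs

-- ===== VERDICT (by name: the statement is the Claim_ definition above) =====
theorem f_brutal_spec : Claim_equal_f_brutal := by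
  intro arr K _ _
  unfold Spec_f_brutal
  simp only [f_brutal_alt]
  have hinv := dp_invariant arr K arr.length (le_refl _)
  rw [show ((arr.length : Int) - 1 - (arr.length : Int)) = (-1 : Int) by ring] at hinv
  rw [hinv]
  have h0 : (0 : Int) ≤ (arr.length : Int) := by positivity
  rw [PySem.List.pyGetD_of_nonneg _ _ h0]
  have hlt : (arr.length : Int).toNat < ((List.range (arr.length + 1)).map (suffAns arr K)).length := by
    simp only [List.length_map, List.length_range, Int.toNat_natCast]; omega
  rw [List.getD_eq_getElem _ _ hlt]
  simp only [List.getElem_map, List.getElem_range, Int.toNat_natCast]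
  simp [suffAns]
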